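-- pv_equiv track=rewrite | github.com/cakelake1/Python-study | 1.3/5_task.py | SynchronizingTables
-- ===== SOURCE A (Python) =====
-- def SynchronizingTables(N, ids, salary):
--      copy_ids = ids
--      index_ids = []
--      for i in range(N):
--           index_ids.append((copy_ids[i], i))
--
--      sorted_index_ids = sorted(index_ids)
--      sorted_salary = sorted(salary)
--      result = []
--      for _ in range(N):
--           result.append(0)
--      for i in range(N):
--           start_index = sorted_index_ids[i][1]
--           result[start_index] = sorted_salary[i]
--      return result
-- ===== SOURCE B (Python) =====
-- def SynchronizingTables(N, ids, salary):
--     # counting-sort flavour: no (id, index) pair sort, no scatter-write.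
--     # The salary of position i is the k-th smallest one, where
--     # k = (first index of ids[i] in the sorted id multiset) + (occurrences of ids[i] before i).
--     sorted_ids = sorted(ids[i] for i in range(N))
--     sorted_salary = sorted(salary)
--     first = {}
--     for r, v in enumerate(sorted_ids):
--         if v not in first:
--             first[v] = r
--     seen = {}
--     out = []
--     for i in range(N):
--         v = ids[i]
--         k = seen.get(v, 0)
--         seen[v] = k + 1
--         out.append(sorted_salary[first[v] + k])
--     return out
-- ===== Notes on version B (the rewrite author's own statement) =====
-- stated objective: alternative
-- what changed: A sorts (id,index) pairs lexicographically and scatter-writes the sorted salaries through that permutation; B never sorts indices: it sorts the id values alone, builds a first-occurrence-rank dictionary from the sorted value list, and gathers each position's salary as sorted_salary[first[id] + occurrences of id seen so far].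
import Mathlib
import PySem

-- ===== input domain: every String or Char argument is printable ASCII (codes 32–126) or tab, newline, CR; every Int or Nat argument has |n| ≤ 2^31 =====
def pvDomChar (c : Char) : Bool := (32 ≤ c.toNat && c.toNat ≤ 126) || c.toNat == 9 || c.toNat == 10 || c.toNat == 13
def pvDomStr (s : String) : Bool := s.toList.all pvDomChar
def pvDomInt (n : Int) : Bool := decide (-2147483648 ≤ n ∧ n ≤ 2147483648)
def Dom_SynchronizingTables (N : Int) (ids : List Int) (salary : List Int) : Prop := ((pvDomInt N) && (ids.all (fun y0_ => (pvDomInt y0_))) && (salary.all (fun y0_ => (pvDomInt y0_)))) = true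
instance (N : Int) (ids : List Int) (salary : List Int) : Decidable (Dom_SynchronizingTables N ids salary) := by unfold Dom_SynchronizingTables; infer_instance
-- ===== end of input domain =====

-- B replaces A's lexicographic (id,index)-pair sort plus scatter-write by a counting-sort-style
-- gather: sort the id values alone, record each value's first rank in a dictionary, and read each
-- position's salary at first[id] + (occurrences of id seen so far); an alternative of the same cost.

-- ===== PORT A =====
-- pyGetD defaults are only reached where Python raises IndexError; Pre_ excludes those inputs.
def SynchronizingTables (N : Int) (ids : List Int) (salary : List Int) : List Int :=
  let copy_ids := ids
  let index_ids := (PySem.List.pyRange 0 N 1).foldl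
      (fun acc i => acc ++ [(PySem.List.pyGetD copy_ids i 0, i)]) []
  let sorted_index_ids := PySem.List.sorted2 index_ids (fun p => p.1) (fun p => p.2)
  let sorted_salary := PySem.List.sorted salary (fun x => x)
  let result0 := (PySem.List.pyRange 0 N 1).foldl (fun acc _ => acc ++ [(0 : Int)]) []
  (PySem.List.pyRange 0 N 1).foldl
    (fun res i =>
      let start_index := (PySem.List.pyGetD sorted_index_ids i ((0 : Int), (0 : Int))).2
      PySem.List.pySetD res start_index (PySem.List.pyGetD sorted_salary i 0))
    result0

-- ===== PORT B =====
-- pyGetD / Dict.getD defaults are only reached where Python raises IndexError/KeyError; Pre_ excludes those inputs.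
def SynchronizingTables_alt (N : Int) (ids : List Int) (salary : List Int) : List Int :=
  let sorted_ids := PySem.List.sorted
      ((PySem.List.pyRange 0 N 1).map (fun i => PySem.List.pyGetD ids i 0)) (fun x => x)
  let sorted_salary := PySem.List.sorted salary (fun x => x)
  let first := (PySem.List.enumerate sorted_ids).foldl
      (fun d p => if d.contains p.2 then d else d.insert p.2 p.1)
      (PySem.Dict.empty : PySem.Dict Int Int)
  let fin := (PySem.List.pyRange 0 N 1).foldl
      (fun s i =>
        let v := PySem.List.pyGetD ids i 0
        let k := s.1.getD v 0
        (s.1.insert v (k + 1),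
         s.2 ++ [PySem.List.pyGetD sorted_salary (first.getD v 0 + k) 0]))
      ((PySem.Dict.empty : PySem.Dict Int Int), ([] : List Int))
  fin.2

-- ===== PRECONDITION & SPEC =====
-- Python A raises IndexError as soon as N exceeds the length of ids or of salary; exactly those inputs are excluded.
def Pre_SynchronizingTables (N : Int) (ids : List Int) (salary : List Int) : Prop :=
  N ≤ (ids.length : Int) ∧ N ≤ (salary.length : Int)
instance (N : Int) (ids : List Int) (salary : List Int) : Decidable (Pre_SynchronizingTables N ids salary) := by unfold Pre_SynchronizingTables; infer_instance

def pvWitness_SynchronizingTables : Int × List Int × List Int := (3, [5, 2, 9], [300, 100, 200])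

def Spec_SynchronizingTables (N : Int) (ids : List Int) (salary : List Int) (out : List Int) : Prop := out = SynchronizingTables_alt N ids salary
instance (N : Int) (ids : List Int) (salary : List Int) (out : List Int) : Decidable (Spec_SynchronizingTables N ids salary out) := by unfold Spec_SynchronizingTables; infer_instance

-- ===== CLAIM (what is proved, stated in full; the proofs are below) =====
def Claim_equal_SynchronizingTables : Prop := ∀ (N : Int) (ids : List Int) (salary : List Int), Dom_SynchronizingTables N ids salary → Pre_SynchronizingTables N ids salary → Spec_SynchronizingTables N ids salary (SynchronizingTables N ids salary)

-- ===== LEMMAS AND PROOFS =====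

-- strict lexicographic order on (id, index) pairs, as a Bool comparator
def pvLtB (p q : Int × Int) : Bool :=
  decide (p.1 < q.1) || (decide (p.1 = q.1) && decide (p.2 < q.2))

theorem pv_cmp_eq_pvLtB :
    (fun (a b : Int × Int) => decide (a.1 < b.1) || (!decide (b.1 < a.1) && decide (a.2 < b.2)))
      = pvLtB := by
  funext a b
  simp only [pvLtB]
  by_cases h1 : a.1 < b.1
  · simp [h1]
  · by_cases h2 : b.1 < a.1
    · simp [h1, h2, show ¬ a.1 = b.1 by omega]
    · simp [h1, h2, show a.1 = b.1 by omega]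

theorem pv_ltB_trans {a b c : Int × Int} (h1 : pvLtB a b = true) (h2 : pvLtB b c = true) :
    pvLtB a c = true := by
  simp only [pvLtB, Bool.or_eq_true, Bool.and_eq_true, decide_eq_true_eq] at *
  omega

theorem pv_ltB_asymm {a b : Int × Int} (h : pvLtB a b = true) : pvLtB b a = false := by
  cases hba : pvLtB b a
  · rfl
  · have haa := pv_ltB_trans h hba
    simp only [pvLtB, Bool.or_eq_true, Bool.and_eq_true, decide_eq_true_eq] at haa
    omega

theorem pv_ltB_total {a b : Int × Int} (h : a ≠ b) : pvLtB a b = true ∨ pvLtB b a = true := by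
  rcases a with ⟨a1, a2⟩; rcases b with ⟨b1, b2⟩
  simp only [pvLtB, Bool.or_eq_true, Bool.and_eq_true, decide_eq_true_eq]
  have h' : a1 ≠ b1 ∨ a2 ≠ b2 := by
    by_contra hc
    push_neg at hc
    exact h (by simp [hc.1, hc.2])
  omega

theorem pv_ltB_irrefl (a : Int × Int) : pvLtB a a = false := by
  simp [pvLtB]

theorem pv_insertBy_pairwise (x : Int × Int) (ys : List (Int × Int))
    (hnd : x ∉ ys) (hp : ys.Pairwise (fun a b => pvLtB a b = true)) :
    (PySem.List.insertBy pvLtB x ys).Pairwise (fun a b => pvLtB a b = true) := by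
  induction ys with
  | nil => simp [PySem.List.insertBy]
  | cons y t ih =>
    simp only [PySem.List.insertBy]
    rcases List.pairwise_cons.mp hp with ⟨hyt, hpt⟩
    by_cases hb : pvLtB x y = true
    · simp only [hb, if_true]
      refine List.pairwise_cons.mpr ⟨?_, hp⟩
      intro z hz
      rcases List.mem_cons.mp hz with rfl | hz
      · exact hb
      · exact pv_ltB_trans hb (hyt z hz)
    · simp only [hb, if_false]
      have hxy : x ≠ y := by intro h; exact hnd (h ▸ List.mem_cons_self)
      have hyx : pvLtB y x = true := by
        rcases pv_ltB_total hxy with h | h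
        · exact absurd h hb
        · exact h
      refine List.pairwise_cons.mpr ⟨?_, ih (fun h => hnd (List.mem_cons_of_mem _ h)) hpt⟩
      intro z hz
      rcases (PySem.List.mem_insertBy _ _ _ _).mp hz with rfl | hz
      · exact hyx
      · exact hyt z hz

theorem pv_fold_insert_pairwise :
    ∀ (l acc : List (Int × Int)), l.Nodup → (∀ x ∈ l, x ∉ acc) →
      acc.Pairwise (fun a b => pvLtB a b = true) →
      (l.foldl (fun a x => PySem.List.insertBy pvLtB x a) acc).Pairwise
        (fun a b => pvLtB a b = true) := by
  intro l
  induction l with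
  | nil => intro acc _ _ hacc; exact hacc
  | cons x t ih =>
    intro acc hnd hdis hacc
    simp only [List.foldl_cons]
    rcases List.nodup_cons.mp hnd with ⟨hxt, hndt⟩
    apply ih _ hndt
    · intro z hz hzin
      rcases (PySem.List.mem_insertBy _ _ _ _).mp hzin with rfl | hzin
      · exact hxt hz
      · exact hdis z (List.mem_cons_of_mem _ hz) hzin
    · exact pv_insertBy_pairwise x acc (hdis x List.mem_cons_self) hacc

-- countP of a prefix-true/suffix-false predicate is the split point
theorem pv_countP_eq_of_split {α : Type} (L : List α) (p : α → Bool) (k : Nat)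
    (hk : k ≤ L.length)
    (hb : ∀ (m : Nat) (hm : m < L.length), m < k → p L[m] = true)
    (ha : ∀ (m : Nat) (hm : m < L.length), k ≤ m → p L[m] = false) :
    L.countP p = k := by
  have hsplit := List.take_append_drop k L
  have h1 : (L.take k).countP p = (L.take k).length := by
    rw [List.countP_eq_length]
    intro a hmem
    obtain ⟨m, hm, rfl⟩ := List.mem_iff_getElem.mp hmem
    rw [List.getElem_take]
    exact hb m (by simp at hm; omega) (by simp at hm; omega)
  have h2 : (L.drop k).countP p = 0 := by
    rw [List.countP_eq_zero]
    intro a hmem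
    obtain ⟨m, hm, rfl⟩ := List.mem_iff_getElem.mp hmem
    rw [List.getElem_drop]
    simp only [List.length_drop] at hm
    rw [ha (k + m) (by omega) (by omega)]
    simp
  calc L.countP p = ((L.take k) ++ (L.drop k)).countP p := by rw [hsplit]
    _ = k := by rw [List.countP_append, h1, h2, List.length_take]; omega

-- countP of a disjoint disjunction splits into a sum
theorem pv_countP_orb {α : Type} (L : List α) (p q : α → Bool)
    (h : ∀ x ∈ L, (p x && q x) = false) :
    L.countP (fun x => p x || q x) = L.countP p + L.countP q := by
  induction L with
  | nil => simp
  | cons x t ih =>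
    have hx := h x List.mem_cons_self
    have ht := ih (fun z hz => h z (List.mem_cons_of_mem _ hz))
    simp only [List.countP_cons, ht]
    rcases Bool.and_eq_false_iff.mp hx with hp | hq
    · simp [hp]; omega
    · simp [hq]; omega

-- idxOf minimality
theorem pv_lt_idxOf_ne (xs : List Int) (v : Int) :
    ∀ (m : Nat) (hm : m < xs.length), m < xs.idxOf v → xs[m] ≠ v := by
  induction xs with
  | nil => intro m hm; simp at hm
  | cons x t ih =>
    intro m hm hlt
    by_cases hx : x = v
    · rw [List.idxOf_cons] at hlt
      simp [hx] at hlt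
    · cases m with
      | zero => simpa using hx
      | succ m =>
        rw [List.idxOf_cons] at hlt
        have hbe : (x == v) = false := by simp [hx]
        simp only [hbe, cond_false] at hlt
        exact ih m (by simpa using hm) (by omega)

-- in a ≤-sorted list, the number of strictly smaller elements is the first-occurrence index
theorem pv_countP_lt_eq_idxOf (ys : List Int) (v : Int) (hmem : v ∈ ys)
    (hp : ys.Pairwise (· ≤ ·)) :
    ys.countP (fun y => decide (y < v)) = ys.idxOf v := by
  have hklen : ys.idxOf v < ys.length := List.idxOf_lt_length_of_mem hmem
  have hgv : ys[ys.idxOf v] = v := List.getElem_idxOf hklen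
  apply pv_countP_eq_of_split ys _ (ys.idxOf v) (le_of_lt hklen)
  · intro m hm hlt
    have hle : ys[m] ≤ ys[ys.idxOf v] := List.pairwise_iff_getElem.mp hp m _ hm hklen hlt
    have hne : ys[m] ≠ v := pv_lt_idxOf_ne ys v m hm hlt
    rw [hgv] at hle
    simp only [decide_eq_true_eq]
    omega
  · intro m hm hge
    rcases Nat.eq_or_lt_of_le hge with rfl | hgt
    · simp [hgv]
    · have hle : ys[ys.idxOf v] ≤ ys[m] := List.pairwise_iff_getElem.mp hp _ m hklen hm hgt
      rw [hgv] at hle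
      simp only [decide_eq_false_iff_not, decide_eq_true_eq]
      omega

-- find? when the matching element is unique
theorem pv_find?_eq_some_of_unique {α : Type} (L : List α) (P : α → Bool) (a : α)
    (ha : a ∈ L) (hPa : P a = true) (huniq : ∀ x ∈ L, P x = true → x = a) :
    L.find? P = some a := by
  have hs : (L.find? P).isSome := List.find?_isSome.mpr ⟨a, ha, hPa⟩
  obtain ⟨y, hy⟩ := Option.isSome_iff_exists.mp hs
  rw [hy]
  have hyL : y ∈ L := List.mem_of_find?_eq_some hy
  have hPy : P y = true := List.find?_some hy
  rw [huniq y hyL hPy]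

-- the keep-first dict fold never changes an existing key
theorem pv_keepfirst_contains :
    ∀ (ps : List (Int × Int)) (d : PySem.Dict Int Int) (v : Int), d.contains v = true →
      (ps.foldl (fun d p => if d.contains p.2 then d else d.insert p.2 p.1) d).get? v
        = d.get? v := by
  intro ps
  induction ps with
  | nil => intro d v _; rfl
  | cons p t ih =>
    intro d v hc
    simp only [List.foldl_cons]
    by_cases hp : d.contains p.2 = true
    · simp only [hp, if_true]; exact ih d v hc
    · simp only [Bool.not_eq_true] at hp
      simp only [hp, Bool.false_eq_true, if_false]
      have hne : v ≠ p.2 := by intro h; rw [h] at hc; rw [hc] at hp; cases hp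
      rw [ih _ v (by rw [PySem.Dict.contains_insert]; simp [hc]),
        PySem.Dict.get?_insert_of_ne _ _ hne]

-- the keep-first dict fold records the first pair with each key
theorem pv_keepfirst_get? :
    ∀ (ps : List (Int × Int)) (d : PySem.Dict Int Int) (v : Int), d.contains v = false →
      (ps.foldl (fun d p => if d.contains p.2 then d else d.insert p.2 p.1) d).get? v
        = (ps.find? (fun p => p.2 == v)).map (·.1) := by
  intro ps
  induction ps with
  | nil =>
    intro d v hc
    simp [List.find?_nil, (PySem.Dict.get?_eq_none_iff_contains d v).mpr hc]
  | cons p t ih =>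
    intro d v hc
    simp only [List.foldl_cons, List.find?_cons]
    by_cases hpv : p.2 = v
    · have hbe : (p.2 == v) = true := by simp [hpv]
      simp only [hbe]
      have hdc : d.contains p.2 = false := by rw [hpv]; exact hc
      simp only [hdc, Bool.false_eq_true, if_false]
      rw [pv_keepfirst_contains t _ v
        (by rw [hpv] at *; rw [PySem.Dict.contains_insert]; simp),
        hpv, PySem.Dict.get?_insert_self]
      rfl
    · have hbe : (p.2 == v) = false := by simp [hpv]
      simp only [hbe, Bool.false_eq_true, if_false]
      by_cases hp : d.contains p.2 = true
      · simp only [hp, if_true]; exact ih d v hc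
      · simp only [Bool.not_eq_true] at hp
        simp only [hp, Bool.false_eq_true, if_false]
        apply ih
        rw [PySem.Dict.contains_insert]
        have hvp : (v == p.2) = false := beq_eq_false_iff_ne.mpr (fun h => hpv h.symm)
        simp [hc, hvp]

-- find? over enumerate locates the first occurrence
theorem pv_find?_enumerate (xs : List Int) :
    ∀ (s : Int) (v : Int), v ∈ xs →
      (PySem.List.enumerate xs s).find? (fun p => p.2 == v)
        = some (s + (xs.idxOf v : Int), v) := by
  induction xs with
  | nil => intro s v h; cases h
  | cons x t ih =>
    intro s v hmem
    rw [PySem.List.enumerate_cons, List.find?_cons]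
    by_cases hx : x = v
    · have hbe : ((s, x).2 == v) = true := by simp [hx]
      simp only [hbe]
      rw [List.idxOf_cons]
      have : (x == v) = true := by simp [hx]
      simp [this, hx]
    · have hbe : ((s, x).2 == v) = false := by simp [hx]
      simp only [hbe, Bool.false_eq_true, if_false]
      have hmt : v ∈ t := by
        rcases List.mem_cons.mp hmem with h | h
        · exact absurd h.symm hx
        · exact h
      rw [ih (s + 1) v hmt, List.idxOf_cons]
      have : (x == v) = false := by simp [hx]
      simp only [this, cond_false]
      congr 1
      push_cast
      ring_nf

-- the first component of B's pair fold is a plain counter fold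
theorem pv_occ_fst (g : Int → Int) (F : Int → Int → Int) :
    ∀ (l : List Int) (d : PySem.Dict Int Int) (out : List Int),
      (l.foldl (fun s i =>
          (s.1.insert (g i) (s.1.getD (g i) 0 + 1), s.2 ++ [F i (s.1.getD (g i) 0)]))
        (d, out)).1
      = l.foldl (fun d i => d.insert (g i) (d.getD (g i) 0 + 1)) d := by
  intro l
  induction l with
  | nil => intro d out; rfl
  | cons x t ih => intro d out; simp only [List.foldl_cons]; exact ih _ _

theorem pv_counter_map (g : Int → Int) :
    ∀ (l : List Int) (d : PySem.Dict Int Int),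
      l.foldl (fun d i => d.insert (g i) (d.getD (g i) 0 + 1)) d
        = (l.map g).foldl (fun d x => d.insert x (d.getD x 0 + 1)) d := by
  intro l
  induction l with
  | nil => intro d; rfl
  | cons x t ih => intro d; simp only [List.map_cons, List.foldl_cons]; exact ih _

-- B's gather loop, characterised: element j reads at offset (count of g j among g 0 .. g (j-1))
theorem pv_occ_out (g : Int → Int) (F : Int → Int → Int) :
    ∀ (n : Nat) (out : List Int),
      ((PySem.List.pyRange 0 (n : Int) 1).foldl (fun s i =>
          (s.1.insert (g i) (s.1.getD (g i) 0 + 1), s.2 ++ [F i (s.1.getD (g i) 0)]))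
        ((PySem.Dict.empty : PySem.Dict Int Int), out)).2
      = out ++ (PySem.List.pyRange 0 (n : Int) 1).map
          (fun j => F j ((((PySem.List.pyRange 0 j 1).map g).count (g j) : Int))) := by
  intro n
  induction n with
  | zero => intro out; simp [PySem.List.pyRange]
  | succ n ih =>
    intro out
    have hcast : ((n + 1 : Nat) : Int) = (n : Int) + 1 := by push_cast; ring
    rw [hcast, PySem.List.pyRange_one_succ_right (by positivity), List.foldl_append,
      List.map_append]
    simp only [List.foldl_cons, List.foldl_nil, List.map_cons, List.map_nil]
    have h1 : ((PySem.List.pyRange 0 (n : Int) 1).foldl (fun s i =>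
          (s.1.insert (g i) (s.1.getD (g i) 0 + 1), s.2 ++ [F i (s.1.getD (g i) 0)]))
        ((PySem.Dict.empty : PySem.Dict Int Int), out)).1.getD (g (n : Int)) 0
        = ((((PySem.List.pyRange 0 (n : Int) 1).map g).count (g (n : Int))) : Int) := by
      rw [pv_occ_fst g F, pv_counter_map g, PySem.Dict.getD_foldl_insert_add_one,
        PySem.Dict.getD_empty, zero_add]
    rw [h1, ih out, List.append_assoc]

-- length of a scatter fold
theorem pv_scatter_len (ps : List (Int × Int)) :
    ∀ (init : List Int),
      (ps.foldl (fun acc p => PySem.List.pySetD acc p.1 p.2) init).length = init.length := by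
  induction ps with
  | nil => intro init; rfl
  | cons p t ih =>
    intro init
    simp only [List.foldl_cons]
    rw [ih, PySem.List.length_pySetD]

-- a scatter fold read back at j is the LAST write to j (first match in the reversed write list)
theorem pv_scatter_get (ps : List (Int × Int)) :
    ∀ (init : List Int) (j : Nat), (∀ p ∈ ps, 0 ≤ p.1) → j < init.length →
      (ps.foldl (fun acc p => PySem.List.pySetD acc p.1 p.2) init)[j]?
        = (match ps.reverse.find? (fun p => p.1 == (j : Int)) with
           | some p => some p.2
           | none => init[j]?) := by
  induction ps with
  | nil => intro init j _ _; rfl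
  | cons p t ih =>
    intro init j hnn hj
    simp only [List.foldl_cons]
    rw [PySem.List.pySetD_of_nonneg _ _ (hnn p (by simp))]
    rw [ih (init.set p.1.toNat p.2) j (fun q hq => hnn q (by simp [hq]))
        (by simpa using hj)]
    rw [List.reverse_cons, List.find?_append]
    cases hfind : t.reverse.find? (fun q => q.1 == (j : Int)) with
    | some q => simp [Option.or]
    | none =>
      simp only [Option.or, List.find?_singleton]
      by_cases heq : p.1 = (j : Int)
      · have : p.1.toNat = j := by omega
        simp [heq, hj]
      · have hne : p.1.toNat ≠ j := by
          have := hnn p (by simp); omega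
        have hbe : (p.1 == (j : Int)) = false := by simp [heq]
        simp [hbe, hne]

-- scatter of an index/value table built by mapping over a list of nonnegative indices
theorem pv_scatter_map_get (R : List Int) (g : Int → Int × Int) (init : List Int) (j : Nat)
    (hnn : ∀ i ∈ R, 0 ≤ (g i).1) (hj : j < init.length) :
    ((R.map g).foldl (fun acc p => PySem.List.pySetD acc p.1 p.2) init)[j]?
      = (match R.reverse.find? (fun i => (g i).1 == (j : Int)) with
         | some i => some (g i).2
         | none => init[j]?) := by
  rw [pv_scatter_get (R.map g) init j
    (by intro p hp; obtain ⟨i, hi, rfl⟩ := List.mem_map.mp hp; exact hnn i hi) hj]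
  rw [← List.map_reverse, List.find?_map]
  rw [show ((fun p : Int × Int => p.1 == (j : Int)) ∘ g) = (fun i => (g i).1 == (j : Int)) from rfl]
  cases R.reverse.find? (fun i => (g i).1 == (j : Int)) <;> rfl

-- pyRange up to a toNat-cast bound
theorem pv_pyRange_toNat (N : Int) :
    PySem.List.pyRange 0 ((N.toNat : Int)) 1 = PySem.List.pyRange 0 N 1 := by
  have h : ((N.toNat : Int) - 0).toNat = (N - 0).toNat := by omega
  rw [PySem.List.pyRange_one, PySem.List.pyRange_one, h]

-- pyGetD at a nonnegative index, through getElem?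
theorem pv_pyGetD_toNat {α : Type} (xs : List α) (i : Int) (d : α) (h : 0 ≤ i) :
    PySem.List.pyGetD xs i d = xs[i.toNat]?.getD d := by
  rw [PySem.List.pyGetD_of_nonneg xs d h, List.getD_eq_getElem?_getD]

-- ===== VERDICT (by name: the statement is the Claim_ definition above) =====
theorem SynchronizingTables_spec : Claim_equal_SynchronizingTables := by
  intro N ids salary _hDom _hPre
  show SynchronizingTables N ids salary = SynchronizingTables_alt N ids salary
  unfold SynchronizingTables SynchronizingTables_alt
  simp only []
  set R := PySem.List.pyRange 0 N 1 with hR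
  set g : Int → Int := fun i => PySem.List.pyGetD ids i 0 with hg
  set f : Int → Int × Int := fun i => (PySem.List.pyGetD ids i 0, i) with hf
  set SS := PySem.List.sorted salary (fun x => x) false with hSS
  -- basic range facts
  have lenR : R.length = N.toNat := by rw [hR, PySem.List.length_pyRange_one]; omega
  have hmemR : ∀ i ∈ R, 0 ≤ i ∧ i < N := by
    intro i hi; rw [hR] at hi; exact PySem.List.mem_pyRange_one.mp hi
  have hndR : R.Nodup := by
    have hpwR : R.Pairwise (· < ·) := by rw [hR]; exact PySem.List.pairwise_lt_pyRange_one 0 N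
    exact hpwR.imp (fun h => ne_of_lt h)
  -- A's built pair list is a map
  have hidx : List.foldl (fun acc i => acc ++ [(PySem.List.pyGetD ids i 0, i)]) [] R
      = R.map f := by
    rw [PySem.List.foldl_append_singleton_eq_map f R []]; rfl
  rw [hidx]
  set sii := PySem.List.sorted2 (R.map f) (fun p => p.1) (fun p => p.2) false with hsii
  have hperm : sii.Perm (R.map f) := PySem.List.sorted2_perm _ _ _ _
  have hndmap : (R.map f).Nodup :=
    List.Nodup.map (fun a b h => congrArg Prod.snd h) hndR
  have hpw : sii.Pairwise (fun a b => pvLtB a b = true) := by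
    rw [hsii, show PySem.List.sorted2 (R.map f) (fun p => p.1) (fun p => p.2) false
        = (R.map f).foldl (fun acc x => PySem.List.insertBy pvLtB x acc) [] from by
      rw [← pv_cmp_eq_pvLtB]; rfl]
    exact pv_fold_insert_pairwise (R.map f) [] hndmap (by simp) List.Pairwise.nil
  have hsndperm : (sii.map (fun p : Int × Int => p.2)).Perm R := by
    have h1 := hperm.map (fun p : Int × Int => p.2)
    have h2 : (R.map f).map (fun p : Int × Int => p.2) = R := by
      rw [List.map_map]; exact List.map_id' R
    rwa [h2] at h1
  have hsndnd : (sii.map (fun p : Int × Int => p.2)).Nodup := hsndperm.nodup_iff.mpr hndR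
  have lensii : sii.length = N.toNat := by rw [hperm.length_eq, List.length_map, lenR]
  -- B-side data
  set idsN := R.map g with hidsN
  set SID := PySem.List.sorted idsN (fun x => x) false with hSID
  have hSIDperm : SID.Perm idsN := PySem.List.sorted_perm _ _ _
  have hSIDpw : SID.Pairwise (· ≤ ·) := by
    have := PySem.List.sorted_pairwise idsN (fun x => x)
    simpa using this
  set FD := (PySem.List.enumerate SID).foldl
      (fun d p => if d.contains p.2 then d else d.insert p.2 p.1)
      (PySem.Dict.empty : PySem.Dict Int Int) with hFD
  have hfirst : ∀ v ∈ idsN, FD.getD v 0 = (SID.idxOf v : Int) := by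
    intro v hv
    have hvS : v ∈ SID := (PySem.List.mem_sorted _ _ _ _).mpr hv
    have h1 := pv_keepfirst_get? (PySem.List.enumerate SID) PySem.Dict.empty v
      (PySem.Dict.contains_empty v)
    rw [pv_find?_enumerate SID 0 v hvS] at h1
    rw [← hFD] at h1
    rw [PySem.Dict.getD_eq_get?_getD, h1]
    simp
  -- B's output as a map
  have hB : (R.foldl (fun s i =>
        (s.1.insert (g i) (s.1.getD (g i) 0 + 1),
         s.2 ++ [PySem.List.pyGetD SS (FD.getD (g i) 0 + s.1.getD (g i) 0) 0]))
      ((PySem.Dict.empty : PySem.Dict Int Int), ([] : List Int))).2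
      = R.map (fun j => PySem.List.pyGetD SS
          (FD.getD (g j) 0 + ((((PySem.List.pyRange 0 j 1).map g).count (g j) : Int))) 0) := by
    have h0 := pv_occ_out g
      (fun j k => PySem.List.pyGetD SS (FD.getD (g j) 0 + k) 0) N.toNat []
    rw [pv_pyRange_toNat, ← hR] at h0
    simpa using h0
  rw [show (R.foldl (fun s i =>
        let v := PySem.List.pyGetD ids i 0
        let k := s.1.getD v 0
        (s.1.insert v (k + 1),
         s.2 ++ [PySem.List.pyGetD SS (FD.getD v 0 + k) 0]))
      ((PySem.Dict.empty : PySem.Dict Int Int), ([] : List Int))).2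
      = (R.foldl (fun s i =>
        (s.1.insert (g i) (s.1.getD (g i) 0 + 1),
         s.2 ++ [PySem.List.pyGetD SS (FD.getD (g i) 0 + s.1.getD (g i) 0) 0]))
      ((PySem.Dict.empty : PySem.Dict Int Int), ([] : List Int))).2 from rfl, hB]
  -- A's zero vector
  have hres0 : List.foldl (fun acc (_ : Int) => acc ++ [(0 : Int)]) [] R
      = R.map (fun _ => (0 : Int)) := by
    rw [PySem.List.foldl_append_singleton_eq_map (fun _ => (0 : Int)) R []]; rfl
  rw [hres0]
  -- A's scatter loop over an explicit table
  have hAfold :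
      List.foldl (fun res i => PySem.List.pySetD res
          (PySem.List.pyGetD sii i ((0 : Int), (0 : Int))).2
          (PySem.List.pyGetD SS i 0)) (R.map (fun _ => (0 : Int))) R
      = (R.map (fun i => ((PySem.List.pyGetD sii i ((0 : Int), (0 : Int))).2,
            PySem.List.pyGetD SS i 0))).foldl
          (fun acc p => PySem.List.pySetD acc p.1 p.2) (R.map (fun _ => (0 : Int))) := by
    rw [List.foldl_map]
  rw [hAfold]
  -- pointwise facts about sii reads
  have hsiiget : ∀ (i : Int) (h0 : 0 ≤ i) (hN : i < N),
      PySem.List.pyGetD sii i ((0 : Int), (0 : Int))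
        = sii[i.toNat]'(by omega) := by
    intro i h0 hN
    rw [pv_pyGetD_toNat sii i _ h0, List.getElem?_eq_getElem (by omega)]
    simp
  have hnnA : ∀ i ∈ R, 0 ≤ (((PySem.List.pyGetD sii i ((0 : Int), (0 : Int))).2,
      PySem.List.pyGetD SS i 0) : Int × Int).1 := by
    intro i hi
    obtain ⟨h0, hN⟩ := hmemR i hi
    have hlt : i.toNat < sii.length := by omega
    rw [pv_pyGetD_toNat sii i _ h0, List.getElem?_eq_getElem hlt]
    have hmem2 : sii[i.toNat] ∈ R.map f := hperm.mem_iff.mp (List.getElem_mem hlt)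
    obtain ⟨p, hp, hfp⟩ := List.mem_map.mp hmem2
    have := (hmemR p hp).1
    simp only [Option.getD_some, ← hfp, hf]
    exact this
  -- extensional comparison
  apply List.ext_getElem?
  intro j
  by_cases hj : j < N.toNat
  · -- the pair (g j, j) sits at a unique position k in sii
    have hjR : (j : Int) ∈ R := by
      rw [hR]; exact PySem.List.mem_pyRange_one.mpr ⟨by omega, by omega⟩
    have hxmem : f (j : Int) ∈ sii := hperm.mem_iff.mpr (List.mem_map.mpr ⟨_, hjR, rfl⟩)
    obtain ⟨k, hklt, hk⟩ := List.mem_iff_getElem.mp hxmem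
    have hkN : k < N.toNat := by omega
    have huniq : ∀ (m : Nat) (hm : m < sii.length), (sii[m]'hm).2 = (j : Int) → m = k := by
      intro m hm h2
      have hmm : m < (sii.map (fun p : Int × Int => p.2)).length := by
        rw [List.length_map]; omega
      have hkk : k < (sii.map (fun p : Int × Int => p.2)).length := by
        rw [List.length_map]; omega
      have heq2 : (sii.map (fun p : Int × Int => p.2))[m]'hmm
          = (sii.map (fun p : Int × Int => p.2))[k]'hkk := by
        rw [List.getElem_map, List.getElem_map, h2, hk]
      exact (List.Nodup.getElem_inj_iff hsndnd).mp heq2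
    -- k equals the rank of position j
    have hcount1 : sii.countP (fun p => pvLtB p (f (j : Int))) = k := by
      apply pv_countP_eq_of_split sii _ k (by omega)
      · intro m hm hmk
        have := List.pairwise_iff_getElem.mp hpw m k hm hklt hmk
        rwa [hk] at this
      · intro m hm hkm
        rcases Nat.eq_or_lt_of_le hkm with rfl | hgt
        · rw [hk]; exact pv_ltB_irrefl _
        · have := List.pairwise_iff_getElem.mp hpw k m hklt hm hgt
          rw [hk] at this
          exact pv_ltB_asymm this
    have hcount2 : sii.countP (fun p => pvLtB p (f (j : Int)))
        = R.countP (fun i => pvLtB (f i) (f (j : Int))) := by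
      rw [List.Perm.countP_eq _ hperm, List.countP_map]; rfl
    have hsplitOr : R.countP (fun i => pvLtB (f i) (f (j : Int)))
        = R.countP (fun i => decide (g i < g (j : Int)))
          + R.countP (fun i => decide (g i = g (j : Int)) && decide (i < (j : Int))) := by
      have hcongr : R.countP (fun i => pvLtB (f i) (f (j : Int)))
          = R.countP (fun i => decide (g i < g (j : Int))
              || (decide (g i = g (j : Int)) && decide (i < (j : Int)))) := by rfl
      rw [hcongr]
      apply pv_countP_orb
      intro x _
      by_cases h5 : g x < g (j : Int)
      · simp [h5, show ¬ g x = g (j : Int) by omega]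
      · simp [h5]
    have hc2 : R.countP (fun i => decide (g i = g (j : Int)) && decide (i < (j : Int)))
        = (PySem.List.pyRange 0 (j : Int) 1).countP (fun p => decide (g p = g (j : Int))) := by
      have hsp : R = PySem.List.pyRange 0 (j : Int) 1 ++ PySem.List.pyRange (j : Int) N 1 := by
        rw [hR]
        exact PySem.List.pyRange_one_append 0 (j : Int) N (by positivity) (by omega)
      have hA1 : (PySem.List.pyRange 0 (j : Int) 1).countP
            (fun i => decide (g i = g (j : Int)) && decide (i < (j : Int)))
          = (PySem.List.pyRange 0 (j : Int) 1).countP (fun p => decide (g p = g (j : Int))) := by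
        apply List.countP_congr
        intro x hx
        have := PySem.List.mem_pyRange_one.mp hx
        simp [show x < (j : Int) by omega]
      have hA2 : (PySem.List.pyRange (j : Int) N 1).countP
            (fun i => decide (g i = g (j : Int)) && decide (i < (j : Int))) = 0 := by
        rw [List.countP_eq_zero]
        intro x hx
        have := PySem.List.mem_pyRange_one.mp hx
        simp [show ¬ x < (j : Int) by omega]
      rw [hsp, List.countP_append, hA1, hA2]
      omega
    -- A's side: the unique last writer of position j
    have hjlenA : j < (R.map (fun _ => (0 : Int))).length := by
      rw [List.length_map, lenR]; omega
    have hLA := pv_scatter_map_get R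
      (fun i => ((PySem.List.pyGetD sii i ((0 : Int), (0 : Int))).2, PySem.List.pyGetD SS i 0))
      (R.map (fun _ => (0 : Int))) j hnnA hjlenA
    have hfind : R.reverse.find? (fun i =>
        ((PySem.List.pyGetD sii i ((0 : Int), (0 : Int))).2 == (j : Int))) = some ((k : Int)) := by
      apply pv_find?_eq_some_of_unique
      · rw [List.mem_reverse, hR]
        exact PySem.List.mem_pyRange_one.mpr ⟨by omega, by omega⟩
      · rw [hsiiget (k : Int) (by omega) (by omega)]
        simp only [Int.toNat_natCast]
        rw [hk]
        simp [hf]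
      · intro x hxm hPx
        rw [List.mem_reverse] at hxm
        obtain ⟨hx0, hxN⟩ := hmemR x hxm
        rw [hsiiget x hx0 hxN] at hPx
        have hxk : x.toNat = k := huniq x.toNat (by omega) (by simpa using hPx)
        omega
    rw [hLA, hfind]
    refine Eq.trans (by rfl : _ = some (PySem.List.pyGetD SS ((k : Nat) : Int) 0)) ?_
    -- B's side
    have hRj : R[j]? = some ((j : Int)) := by
      rw [hR, PySem.List.getElem?_pyRange_one]
      rw [if_pos (by omega)]
      simp
    rw [List.getElem?_map, hRj, Option.map_some]
    -- both read sorted salaries at the same index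
    have hgj : g (j : Int) ∈ idsN := by rw [hidsN]; exact List.mem_map.mpr ⟨_, hjR, rfl⟩
    have hgjS : g (j : Int) ∈ SID := (PySem.List.mem_sorted _ _ _ _).mpr hgj
    have hidxof : SID.countP (fun y => decide (y < g (j : Int))) = SID.idxOf (g (j : Int)) :=
      pv_countP_lt_eq_idxOf SID _ hgjS hSIDpw
    have hc1 : SID.countP (fun y => decide (y < g (j : Int)))
        = R.countP (fun i => decide (g i < g (j : Int))) := by
      rw [List.Perm.countP_eq _ hSIDperm, hidsN, List.countP_map]; rfl
    have hcnt : (((PySem.List.pyRange 0 (j : Int) 1).map g).count (g (j : Int)))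
        = (PySem.List.pyRange 0 (j : Int) 1).countP (fun p => decide (g p = g (j : Int))) := by
      rw [List.count_eq_countP, List.countP_map]
      apply List.countP_congr
      intro x _
      by_cases h : g x = g (j : Int)
      · simp [h]
      · simp [h, Ne.symm h]
    have hidxeq : ((k : Nat) : Int) = FD.getD (g (j : Int)) 0
        + ((((PySem.List.pyRange 0 (j : Int) 1).map g).count (g (j : Int)) : Int)) := by
      rw [hfirst _ hgj]
      omega
    rw [hidxeq]
  · -- past the end: both sides are none
    have hlenA : ((R.map (fun i => ((PySem.List.pyGetD sii i ((0 : Int), (0 : Int))).2,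
          PySem.List.pyGetD SS i 0))).foldl
          (fun acc p => PySem.List.pySetD acc p.1 p.2) (R.map (fun _ => (0 : Int)))).length
        = N.toNat := by
      rw [pv_scatter_len]; simp [lenR]
    rw [List.getElem?_eq_none (by rw [hlenA]; omega),
      List.getElem?_eq_none (by rw [List.length_map, lenR]; omega)]
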